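-- pv_equiv track=rewrite | github.com/tzzht/Subator | src/spliter.py | get_all_possible_fragments
-- ===== SOURCE A (Python) =====
-- def sep(span1, span2):
--
--     no_sep_follow = [',', '.', '!', '?', ';', ':', "'", '"', "n't", "'s", '-', '%', ' ']
--     no_sep_current = ['$', '-', ' ']
--
--     if span1 == '' or span2 == '':
--         return ''
--
--     if span1.endswith('gon') and span2.startswith('na'):
--         return ''
--     if not (span1[-1].isascii() and span2[0].isascii()):
--         return ''
--
--     if span2.startswith(tuple(no_sep_follow)):
--         return ''
--     if span1.endswith(tuple(no_sep_current)):
--         return ''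
--
--     if span2[0].isdigit() and span1[-1] == '.':
--         return ''
--     return ' '
--
-- def join_spans(spans):
--     result = spans[0]
--     for i in range(1, len(spans)):
--             result += sep(spans[i-1], spans[i]) + spans[i]
--     return result
--
-- def get_all_possible_fragments(spans, n):
--     if n <= 0 or len(spans) < n:
--         return []
--
--     def divide_helper(spans, n):
--         if n == 1:
--             yield [join_spans(spans)]
--             return
--
--         for i in range(1, len(spans)):
--             for rest in divide_helper(spans[i:], n - 1):
--                 yield [join_spans(spans[:i])] + rest
--
--     return list(divide_helper(spans, n))
-- ===== SOURCE B (Python) =====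
-- # sep and join_spans are the module's shared text-joining helpers, reused unchanged (as the task
-- # intends); the re-implemented algorithm is get_all_possible_fragments below, which enumerates
-- # interior cut-position combinations instead of A's recursive generator.
-- def sep(span1, span2):
--
--     no_sep_follow = [',', '.', '!', '?', ';', ':', "'", '"', "n't", "'s", '-', '%', ' ']
--     no_sep_current = ['$', '-', ' ']
--
--     if span1 == '' or span2 == '':
--         return ''
--
--     if span1.endswith('gon') and span2.startswith('na'):
--         return ''
--     if not (span1[-1].isascii() and span2[0].isascii()):
--         return ''
--
--     if span2.startswith(tuple(no_sep_follow)):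
--         return ''
--     if span1.endswith(tuple(no_sep_current)):
--         return ''
--
--     if span2[0].isdigit() and span1[-1] == '.':
--         return ''
--     return ' '
--
-- def join_spans(spans):
--     result = spans[0]
--     for i in range(1, len(spans)):
--             result += sep(spans[i-1], spans[i]) + spans[i]
--     return result
--
-- def _combinations(items, r):
--     # itertools.combinations(items, r) as lists, in its lexicographic order
--     if r == 0:
--         return [[]]
--     if not items:
--         return []
--     first, rest = items[0], items[1:]
--     return [[first] + c for c in _combinations(rest, r - 1)] + _combinations(rest, r)
--
-- def _join_groups(spans, cuts):
--     b = [0] + cuts + [len(spans)]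
--     return [join_spans(spans[l:r]) for l, r in zip(b, b[1:])]
--
-- def get_all_possible_fragments(spans, n):
--     if n <= 0 or len(spans) < n:
--         return []
--     return [_join_groups(spans, cuts)
--             for cuts in _combinations(list(range(1, len(spans))), n - 1)]
-- ===== Notes on version B (the rewrite author's own statement) =====
-- stated objective: idiomatic
-- what changed: B replaces A's recursive generator over the first group's length with a direct enumeration of the n-1 interior cut-position combinations (lexicographic order), slicing the spans at each boundary list and joining each group.
import Mathlib
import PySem

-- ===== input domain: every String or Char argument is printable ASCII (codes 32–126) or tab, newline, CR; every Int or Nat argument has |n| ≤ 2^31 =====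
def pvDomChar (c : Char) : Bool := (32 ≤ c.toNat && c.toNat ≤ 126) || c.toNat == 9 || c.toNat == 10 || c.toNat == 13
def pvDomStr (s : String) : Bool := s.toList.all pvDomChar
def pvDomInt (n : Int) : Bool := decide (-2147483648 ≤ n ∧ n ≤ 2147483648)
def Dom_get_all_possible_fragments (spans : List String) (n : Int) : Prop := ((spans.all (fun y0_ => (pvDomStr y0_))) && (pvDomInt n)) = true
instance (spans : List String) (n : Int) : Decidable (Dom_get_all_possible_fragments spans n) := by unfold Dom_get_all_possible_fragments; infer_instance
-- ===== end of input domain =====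

-- B enumerates the n-1 interior cut positions as combinations and slices the spans, instead of A's
-- recursive generator over the first group's length (objective: idiomatic; same output order proved).


-- ===== PORT A =====
-- str.isascii() on a one-char string: code point < 128 (hand-ported; exact)
def pyCharIsascii (c : Char) : Bool := c.toNat < 128

def sep (span1 span2 : String) : String :=
  let no_sep_follow : List String := [",", ".", "!", "?", ";", ":", "'", "\"", "n't", "'s", "-", "%", " "]
  let no_sep_current : List String := ["$", "-", " "]
  if span1 = "" ∨ span2 = "" then ""
  else if PySem.Str.endswith span1 "gon" ∧ PySem.Str.startswith span2 "na" then ""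
  else if ¬ (pyCharIsascii ((PySem.Str.pyGet? span1 (-1)).getD ' ')
             ∧ pyCharIsascii ((PySem.Str.pyGet? span2 0).getD ' ')) then ""
  -- span1[-1]/span2[0] cannot raise here (both strings nonempty), so .getD ' ' is exact
  else if no_sep_follow.any (fun p => PySem.Str.startswith span2 p) then ""
  else if no_sep_current.any (fun p => PySem.Str.endswith span1 p) then ""
  else if PySem.Chars.isdigit ((PySem.Str.pyGet? span2 0).getD ' ')
          ∧ (PySem.Str.pyGet? span1 (-1)).getD ' ' = '.' then ""
  else " "

-- spans[0] cannot raise at any call site (spans is always nonempty there), so .getD "" is exact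
def join_spans (spans : List String) : String :=
  (PySem.List.pyRange 1 (spans.length : Int) 1).foldl
    (fun result i =>
      result ++ sep ((PySem.List.pyGet? spans (i-1)).getD "") ((PySem.List.pyGet? spans i).getD "")
             ++ (PySem.List.pyGet? spans i).getD "")
    ((PySem.List.pyGet? spans 0).getD "")

def divide_helper (spans : List String) (n : Nat) : List (List String) :=
  match n with
  | 0 => []  -- unreachable: A only calls the helper with n ≥ 1
  | 1 => [[join_spans spans]]
  | (m+2) =>
    (PySem.List.pyRange 1 (spans.length : Int) 1).foldl
      (fun acc i =>
        acc ++ (divide_helper (PySem.List.slice spans (some i) none) (m+1)).map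
                 (fun rest => join_spans (PySem.List.slice spans none (some i)) :: rest))
      []

def get_all_possible_fragments (spans : List String) (n : Int) : List (List String) :=
  if n ≤ 0 ∨ (spans.length : Int) < n then []
  else divide_helper spans n.toNat

-- ===== PORT B =====
-- Source B's _combinations is exactly itertools.combinations as lists; PySem.List.combinations is that
-- same recursion (combinations_zero / combinations_nil_succ / combinations_cons_succ), used as the port.
def join_groups (spans : List String) (cuts : List Int) : List String :=
  let b : List Int := 0 :: cuts ++ [(spans.length : Int)]
  (b.zip (PySem.List.slice b (some 1) none)).map
    (fun p => join_spans (PySem.List.slice spans (some p.1) (some p.2)))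

def get_all_possible_fragments_alt (spans : List String) (n : Int) : List (List String) :=
  if n ≤ 0 ∨ (spans.length : Int) < n then []
  else (PySem.List.combinations (PySem.List.pyRange 1 (spans.length : Int) 1) (n - 1).toNat).map
         (fun cuts => join_groups spans cuts)

-- ===== PRECONDITION & SPEC =====
def Spec_get_all_possible_fragments (spans : List String) (n : Int) (out : List (List String)) : Prop := out = get_all_possible_fragments_alt spans n
instance (spans : List String) (n : Int) (out : List (List String)) : Decidable (Spec_get_all_possible_fragments spans n out) := by unfold Spec_get_all_possible_fragments; infer_instance

-- ===== CLAIM (what is proved, stated in full; the proofs are below) =====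
def Claim_equal_get_all_possible_fragments : Prop := ∀ (spans : List String) (n : Int), Dom_get_all_possible_fragments spans n → Spec_get_all_possible_fragments spans n (get_all_possible_fragments spans n)

-- ===== LEMMAS AND PROOFS =====

-- combinations over a range, unrolled on the FIRST chosen element (matches A's outer loop)
lemma comb_pyRange_flatMap_aux (r m : Nat) : ∀ (a b : Int), (b - a).toNat = m →
    PySem.List.combinations (PySem.List.pyRange a b 1) (r+1)
      = (PySem.List.pyRange a b 1).flatMap
          (fun i => (PySem.List.combinations (PySem.List.pyRange (i+1) b 1) r).map (i :: ·)) := by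
  induction m with
  | zero =>
    intro a b hm
    have hba : b ≤ a := by omega
    simp [PySem.List.pyRange_one_eq_nil hba, PySem.List.combinations_nil_succ]
  | succ m ih =>
    intro a b hm
    have hab : a < b := by omega
    rw [PySem.List.pyRange_one_cons hab, PySem.List.combinations_cons_succ, List.flatMap_cons,
        ih (a+1) b (by omega)]

lemma comb_pyRange_flatMap (r : Nat) (a b : Int) :
    PySem.List.combinations (PySem.List.pyRange a b 1) (r+1)
      = (PySem.List.pyRange a b 1).flatMap
          (fun i => (PySem.List.combinations (PySem.List.pyRange (i+1) b 1) r).map (i :: ·)) :=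
  comb_pyRange_flatMap_aux r (b - a).toNat a b rfl

-- pyRange (i+1) b is pyRange 1 (b-i) shifted by i
lemma pyRange_shift (i b : Int) :
    PySem.List.pyRange (i+1) b 1 = (PySem.List.pyRange 1 (b - i) 1).map (· + i) := by
  rw [PySem.List.pyRange_one, PySem.List.pyRange_one, List.map_map]
  have : (b - (i+1)).toNat = (b - i - 1).toNat := by omega
  rw [this]
  exact List.map_congr_left (fun k _ => by simp; ring)

lemma comb_pyRange_shift (k : Nat) (i b : Int) :
    PySem.List.combinations (PySem.List.pyRange (i+1) b 1) k
      = (PySem.List.combinations (PySem.List.pyRange 1 (b - i) 1) k).map (List.map (· + i)) := by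
  rw [pyRange_shift, PySem.List.combinations_map]

lemma slice_shift {α : Type} (xs : List α) (i c d : Int) (hi : 0 ≤ i) (hc : 0 ≤ c) (hd : 0 ≤ d) :
    PySem.List.slice xs (some (c+i)) (some (d+i)) = PySem.List.slice (xs.drop i.toNat) (some c) (some d) := by
  rw [PySem.List.slice_toNat xs (by omega) (by omega), PySem.List.slice_toNat _ hc hd, List.drop_drop]
  have h2 : (d+i).toNat - (c+i).toNat = d.toNat - c.toNat := by omega
  have h1 : (c+i).toNat = i.toNat + c.toNat := by omega
  rw [h2, h1]

-- the boundary pairs of a shifted boundary list: same joined groups, on the dropped suffix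
lemma shift_pairs (s : List String) (i : Int) (hi : 0 ≤ i) (b : List Int) (hb : ∀ x ∈ b, 0 ≤ x) :
    ((b.map (· + i)).zip (b.map (· + i)).tail).map
        (fun p => join_spans (PySem.List.slice s (some p.1) (some p.2)))
      = (b.zip b.tail).map
          (fun p => join_spans (PySem.List.slice (s.drop i.toNat) (some p.1) (some p.2))) := by
  rw [← List.map_tail, List.zip_map, List.map_map]
  refine List.map_congr_left (fun p hp => ?_)
  have h1 : p.1 ∈ b := (List.of_mem_zip hp).1
  have h2 : p.2 ∈ b.tail := (List.of_mem_zip hp).2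
  have h2' : p.2 ∈ b := List.mem_of_mem_tail h2
  simp only [Prod.map, Function.comp]
  rw [slice_shift s i p.1 p.2 hi (hb _ h1) (hb _ h2')]

lemma join_groups_cons (s : List String) (i : Int) (hi : 1 ≤ i) (hiL : i ≤ (s.length : Int))
    (cuts : List Int) (hc : ∀ x ∈ cuts, 1 ≤ x) :
    join_groups s (i :: cuts.map (· + i))
      = join_spans (PySem.List.slice s none (some i)) :: join_groups (s.drop i.toNat) cuts := by
  unfold join_groups
  simp only [List.cons_append, PySem.List.slice_from_one, List.tail_cons, List.zip_cons_cons,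
    List.map_cons]
  have hlen : ((s.drop i.toNat).length : Int) = (s.length : Int) - i := by
    rw [List.length_drop]; omega
  rw [hlen]
  congr 1
  have hb : ∀ x ∈ (0 : Int) :: (cuts ++ [(s.length : Int) - i]), 0 ≤ x := by
    intro x hx
    rcases List.mem_cons.mp hx with h | h
    · omega
    · rcases List.mem_append.mp h with h' | h'
      · exact le_trans (by omega) (hc x h')
      · rw [List.mem_singleton] at h'
        omega
  have key := shift_pairs s i (by omega) ((0 : Int) :: (cuts ++ [(s.length : Int) - i])) hb
  simp only [List.map_cons, List.map_append, List.map_nil, List.tail_cons] at key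
  have e1 : (0 : Int) + i = i := by ring
  have e2 : (s.length : Int) - i + i = (s.length : Int) := by ring
  rw [e1, e2] at key
  exact key

-- main lemma: A's recursive generator equals B's combinations enumeration, in order
lemma helper_eq (k : Nat) : ∀ (s : List String),
    divide_helper s (k+1)
      = (PySem.List.combinations (PySem.List.pyRange 1 (s.length : Int) 1) k).map
          (fun cuts => join_groups s cuts) := by
  induction k with
  | zero =>
    intro s
    show [[join_spans s]] = _
    rw [PySem.List.combinations_zero, List.map_cons, List.map_nil]
    unfold join_groups
    simp only [List.cons_append, List.nil_append, PySem.List.slice_from_one, List.tail_cons, List.zip_cons_cons,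
      List.zip_nil_right, List.map_cons, List.map_nil, PySem.List.slice_zero_start,
      PySem.List.slice_to_natCast, List.take_length]
  | succ k ih =>
    intro s
    show (PySem.List.pyRange 1 (s.length : Int) 1).foldl _ [] = _
    rw [PySem.List.foldl_append_eq_flatMap, List.nil_append,
        comb_pyRange_flatMap k 1 (s.length : Int), List.map_flatMap]
    refine List.flatMap_congr (fun i hi => ?_)
    rw [PySem.List.mem_pyRange_one] at hi
    have hlen : ((s.drop i.toNat).length : Int) = (s.length : Int) - i := by
      rw [List.length_drop]; omega
    rw [PySem.List.slice_from _ (by omega), ih (s.drop i.toNat),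
        comb_pyRange_shift k i (s.length : Int), hlen]
    simp only [List.map_map]
    refine List.map_congr_left (fun cuts hc => ?_)
    have hmem : ∀ x ∈ cuts, 1 ≤ x := by
      intro x hx
      have hsub := PySem.List.sublist_of_mem_combinations hc
      have := hsub.mem hx
      rw [PySem.List.mem_pyRange_one] at this
      omega
    simp only [Function.comp]
    rw [join_groups_cons s i hi.1 (by omega) cuts hmem]

-- ===== VERDICT (by name: the statement is the Claim_ definition above) =====
theorem get_all_possible_fragments_spec : Claim_equal_get_all_possible_fragments := by
  intro spans n _
  unfold Spec_get_all_possible_fragments get_all_possible_fragments get_all_possible_fragments_alt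
  by_cases h : n ≤ 0 ∨ (spans.length : Int) < n
  · rw [if_pos h, if_pos h]
  · rw [if_neg h, if_neg h]
    rcases not_or.mp h with ⟨h1, h2⟩
    have hk : n.toNat = (n - 1).toNat + 1 := by omega
    rw [hk, helper_eq]
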